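-- pv_equiv track=rewrite | github.com/Emillhf/Construction_of_a_Self-Interpreter | ARL/1_tape_to_ARL.py | Convert_tape
-- ===== SOURCE A (Python) =====
-- def Convert_to_Blank(symbol):
--     if symbol == 'b':
--         return 'BLANK'
--     return symbol
--
-- def Convert_tape(tape):
--     translated_tape = "("
--     for idx, symbol in enumerate(tape):
--         if idx == len(tape)-1:
--             translated_tape += (Convert_to_Blank(symbol) + " . nil")
--         else:
--             translated_tape +=  (Convert_to_Blank(symbol) + " . (")
--     translated_tape += ")"*len(tape)
--     return translated_tape
-- ===== SOURCE B (Python) =====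
-- def Convert_to_Blank(symbol):
--     return 'BLANK' if symbol == 'b' else symbol
--
-- def Convert_tape(tape):
--     if not tape:
--         return "nil"
--     out = "nil"
--     for symbol in reversed(tape):
--         out = "(" + Convert_to_Blank(symbol) + " . " + out + ")"
--     return out
-- ===== Notes on version B (the rewrite author's own statement) =====
-- stated objective: simpler
-- what changed: Replaces the enumerate-loop that accumulates a flat prefix string and then appends ')'*len(tape) by a single backwards pass that builds the nested cons-string from 'nil' outward, wrapping the accumulator once per symbol.
-- intended difference: On the empty tape A returns the unbalanced string '(' (an artifact of ')'*0 after the skipped loop), while B returns 'nil', the standard S-expression for the empty list, which is the intended value. — e.g. on Convert_tape([]): A returns "(", B returns "nil"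
import Mathlib
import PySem

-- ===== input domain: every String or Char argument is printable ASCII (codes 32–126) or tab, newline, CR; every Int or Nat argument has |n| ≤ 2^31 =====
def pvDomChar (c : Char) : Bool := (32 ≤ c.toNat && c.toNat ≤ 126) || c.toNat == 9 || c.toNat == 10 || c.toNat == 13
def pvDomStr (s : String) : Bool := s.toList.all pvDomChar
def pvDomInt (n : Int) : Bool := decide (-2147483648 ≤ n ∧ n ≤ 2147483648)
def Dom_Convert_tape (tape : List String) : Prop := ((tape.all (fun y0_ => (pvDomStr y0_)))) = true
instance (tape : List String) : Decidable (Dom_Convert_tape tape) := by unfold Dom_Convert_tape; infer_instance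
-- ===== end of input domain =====

-- B builds the nested cons-string back-to-front from "nil", one wrap per symbol, instead of
-- accumulating a flat prefix string and appending ")"*len(tape); on the empty tape B returns "nil"
-- where A returns "(" (stated as the intended difference D_ below).

-- ===== PORT A =====
def Convert_to_Blank (symbol : String) : String :=
  if symbol == "b" then "BLANK" else symbol

-- hand port of Python's `")" * n` (exact: n copies of ")")
def pvCloseParens : Nat → String
  | 0 => ""
  | n + 1 => ")" ++ pvCloseParens n

def Convert_tape (tape : List String) : String :=
  let translated_tape :=
    (PySem.List.enumerate tape 0).foldl
      (fun acc (p : Int × String) =>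
        if p.1 == (tape.length : Int) - 1 then acc ++ (Convert_to_Blank p.2 ++ " . nil")
        else acc ++ (Convert_to_Blank p.2 ++ " . ("))
      "("
  translated_tape ++ pvCloseParens tape.length

-- ===== PORT B =====
-- `for symbol in reversed(tape): out = "(" + … + out + ")"` is a right fold over the tape
def Convert_tape_alt (tape : List String) : String :=
  if tape = [] then "nil"
  else tape.foldr (fun symbol out => "(" ++ Convert_to_Blank symbol ++ " . " ++ out ++ ")") "nil"

-- ===== PRECONDITION & SPEC =====
-- On the empty tape A returns the unbalanced string "(" (an artifact of ")"*0 after the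
-- skipped loop), while B returns "nil", the standard S-expression for the empty list,
-- which is the intended value.
def D_Convert_tape (tape : List String) : Prop := tape = []
instance (tape : List String) : Decidable (D_Convert_tape tape) := by unfold D_Convert_tape; infer_instance
def Spec_Convert_tape (tape : List String) (out : String) : Prop := ¬ D_Convert_tape tape → out = Convert_tape_alt tape
instance (tape : List String) (out : String) : Decidable (Spec_Convert_tape tape out) := by unfold Spec_Convert_tape; infer_instance
def pvDiffWitness_Convert_tape : List String := []
def pvDiffWitnessOut_Convert_tape : String × String := ("(", "nil")

-- ===== CLAIM (what is proved, stated in full; the proofs are below) =====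
def Claim_unchanged_Convert_tape : Prop := ∀ (tape : List String), Dom_Convert_tape tape → Spec_Convert_tape tape (Convert_tape tape)
def Claim_changed_Convert_tape : Prop := Dom_Convert_tape (pvDiffWitness_Convert_tape) ∧ D_Convert_tape (pvDiffWitness_Convert_tape) ∧ Convert_tape (pvDiffWitness_Convert_tape) = pvDiffWitnessOut_Convert_tape.1 ∧ Convert_tape_alt (pvDiffWitness_Convert_tape) = pvDiffWitnessOut_Convert_tape.2 ∧ pvDiffWitnessOut_Convert_tape.1 ≠ pvDiffWitnessOut_Convert_tape.2
def Claim_exact_Convert_tape : Prop := ∀ (tape : List String), Dom_Convert_tape tape → D_Convert_tape tape → Convert_tape tape ≠ Convert_tape_alt tape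

-- ===== LEMMAS AND PROOFS =====

-- the flat body that A's loop appends after the opening "("
def pvBody : List String → String
  | [] => ""
  | s :: rest =>
    if rest = [] then Convert_to_Blank s ++ " . nil"
    else (Convert_to_Blank s ++ " . (") ++ pvBody rest

theorem pvCloseParens_succ_right (n : Nat) :
    pvCloseParens (n + 1) = pvCloseParens n ++ ")" := by
  induction n with
  | zero => rfl
  | succ m ih =>
    show ")" ++ pvCloseParens (m + 1) = ")" ++ pvCloseParens m ++ ")"
    rw [ih, String.append_assoc]

-- A's loop, over any enumeration suffix, appends pvBody of that suffix
theorem pvLoopA (n : Int) (xs : List String) (hx : xs ≠ []) :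
    ∀ (k : Int) (acc : String), n = k + xs.length →
    (PySem.List.enumerate xs k).foldl
      (fun acc (p : Int × String) =>
        if p.1 == n - 1 then acc ++ (Convert_to_Blank p.2 ++ " . nil")
        else acc ++ (Convert_to_Blank p.2 ++ " . ("))
      acc = acc ++ pvBody xs := by
  induction xs with
  | nil => exact absurd rfl hx
  | cons s rest ih =>
    intro k acc hn
    rw [PySem.List.enumerate]
    cases rest with
    | nil =>
      have hk : (k == n - 1) = true := by simp at hn ⊢; omega
      simp [List.foldl, hk, pvBody]
    | cons t ts =>
      have hk : (k == n - 1) = false := by simp at hn ⊢; omega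
      simp only [List.foldl, hk, Bool.false_eq_true, if_false]
      rw [ih (by simp) (k + 1) _ (by simp at hn ⊢; omega)]
      simp [pvBody, String.append_assoc]

theorem pvLitDotParen (x : String) : " . " ++ ("(" ++ x) = " . (" ++ x := by
  rw [← String.append_assoc]
  congr 1

-- B equals "(" ++ body ++ closing parens on nonempty tapes
theorem pvAltChar (xs : List String) (hx : xs ≠ []) :
    Convert_tape_alt xs = "(" ++ pvBody xs ++ pvCloseParens xs.length := by
  induction xs with
  | nil => exact absurd rfl hx
  | cons s rest ih =>
    cases rest with
    | nil => simp [Convert_tape_alt, pvBody, pvCloseParens, String.append_assoc]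
    | cons t ts =>
      have hrest := ih (by simp)
      rw [Convert_tape_alt] at hrest ⊢
      simp only [reduceCtorEq, if_false] at hrest ⊢
      rw [List.foldr_cons, hrest]
      simp [pvBody, pvCloseParens_succ_right, String.append_assoc, pvLitDotParen]

-- ===== VERDICT (by name: the statement is the Claim_ definition above) =====
theorem Convert_tape_spec : Claim_unchanged_Convert_tape := by
  intro tape _ hD
  unfold D_Convert_tape at hD
  rw [Convert_tape, pvAltChar tape hD, pvLoopA (tape.length : Int) tape hD 0 "(" (by simp)]

theorem Convert_tape_changed : Claim_changed_Convert_tape := by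
  unfold Claim_changed_Convert_tape; decide

theorem Convert_tape_tight : Claim_exact_Convert_tape := by
  intro tape _ hD
  unfold D_Convert_tape at hD
  subst hD
  decide
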